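-- pv_equiv track=rewrite | github.com/ofek/spry | spry/utils.py | calc_section_data
-- ===== SOURCE A (Python) =====
-- def calc_section_data(size, num_parts):
--     """
--     Calculates info about each part of a file of given
--     size separated into given number of parts. Returns
--     a list of dicts having 3 pieces of information:
--
--     - 'start' offset inclusive
--     - 'end' offset inclusive
--     - 'size'
--     """
--
--     # Changing this vital function could
--     # completely break functionality.
--     #
--     # "Jar Jar is the key to all of this."
--
--     if not size:
--         return [{'start': 0, 'end': 0, 'size': 0}]
--     elif not num_parts:
--         num_parts = 1
--     elif num_parts > size:
--         num_parts = size
--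
--     section_size = size // num_parts
--     remainder = size % num_parts
--     section_data = []
--
--     start = 0
--     for _ in range(num_parts):
--         end = start + section_size
--
--         if remainder != 0:
--             end += 1
--             remainder -= 1
--
--         section_data.append({'start': start, 'end': end - 1,
--                              'size': end - start})
--         start = end
--
--     return section_data
-- ===== SOURCE B (Python) =====
-- def calc_section_data(size, num_parts):
--     """Greedy peel re-implementation: no precomputed quotient/remainder pair is
--     threaded; each iteration takes the ceiling share of what remains."""
--     if not size:
--         return [{'start': 0, 'end': 0, 'size': 0}]
--     elif not num_parts:
--         num_parts = 1
--     elif num_parts > size: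
--         num_parts = size
--
--     sections = []
--     start = 0
--     remaining = size
--     parts = num_parts
--     while parts > 0:
--         length = -(-remaining // parts)  # ceiling division: largest fair share first
--         sections.append({'start': start, 'end': start + length - 1,
--                          'size': length})
--         start += length
--         remaining -= length
--         parts -= 1
--     return sections
-- ===== Notes on version B (the rewrite author's own statement) =====
-- stated objective: alternative
-- what changed: Replaces A's precomputed quotient/remainder pair threaded through a range(num_parts) loop with a greedy peel: a while loop that, at each step, takes the ceiling share -(-remaining // parts) of what remains, maintaining (start, remaining, parts) and never computing size // num_parts or size % num_parts up front.
import Mathlib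
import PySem

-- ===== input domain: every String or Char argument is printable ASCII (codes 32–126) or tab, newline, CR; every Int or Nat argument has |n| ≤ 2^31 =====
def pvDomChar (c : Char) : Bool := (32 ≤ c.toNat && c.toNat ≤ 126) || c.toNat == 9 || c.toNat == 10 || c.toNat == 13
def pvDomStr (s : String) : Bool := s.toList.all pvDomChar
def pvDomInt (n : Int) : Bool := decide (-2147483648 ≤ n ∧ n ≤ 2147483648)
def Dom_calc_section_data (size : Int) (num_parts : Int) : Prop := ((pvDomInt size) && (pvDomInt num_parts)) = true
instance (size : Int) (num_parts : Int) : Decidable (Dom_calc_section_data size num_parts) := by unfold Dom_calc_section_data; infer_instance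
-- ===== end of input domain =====

-- B replaces A's precomputed quotient/remainder loop by a greedy peel (each step takes the
-- ceiling share of what remains); objective: alternative decomposition, same cost.


-- ===== PORT A =====
-- A: precompute section_size and remainder once, then a stateful loop threading
-- (start, remainder, acc) through range(num_parts).
def calc_section_data (size : Int) (num_parts : Int) : List (List (String × Int)) :=
  if size == 0 then [[("start", 0), ("end", 0), ("size", 0)]]
  else
    let np := if num_parts == 0 then 1 else if num_parts > size then size else num_parts
    let section_size := PySem.Int.floordiv size np
    let r0 := PySem.Int.mod size np
    let st := (PySem.List.pyRange 0 np 1).foldl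
      (fun (s : Int × Int × List (List (String × Int))) _ =>
        let start := s.1
        let remainder := s.2.1
        let acc := s.2.2
        let e0 := start + section_size
        let e := if remainder != 0 then e0 + 1 else e0
        let remainder' := if remainder != 0 then remainder - 1 else remainder
        (e, remainder', acc ++ [[("start", start), ("end", e - 1), ("size", e - start)]]))
      (0, r0, [])
    st.2.2

-- ===== PORT B =====
-- B helper: the while loop 'while parts > 0' — parts strictly decreases by 1, so the
-- loop is structural recursion on parts.toNat; each step takes the ceiling share
-- -(-remaining // parts) of what remains (no quotient/remainder is precomputed).
def pvPeel (start remaining : Int) : Nat → List (List (String × Int))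
  | 0 => []
  | n + 1 =>
    let length := -(PySem.Int.floordiv (-remaining) ((n : Int) + 1))
    [("start", start), ("end", start + length - 1), ("size", length)] ::
      pvPeel (start + length) (remaining - length) n

def calc_section_data_alt (size : Int) (num_parts : Int) : List (List (String × Int)) :=
  if size == 0 then [[("start", 0), ("end", 0), ("size", 0)]]
  else
    let np := if num_parts == 0 then 1 else if num_parts > size then size else num_parts
    pvPeel 0 size np.toNat

-- ===== PRECONDITION & SPEC =====
def Spec_calc_section_data (size : Int) (num_parts : Int) (out : List (List (String × Int))) : Prop := out = calc_section_data_alt size num_parts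
instance (size : Int) (num_parts : Int) (out : List (List (String × Int))) : Decidable (Spec_calc_section_data size num_parts out) := by unfold Spec_calc_section_data; infer_instance

-- ===== CLAIM (what is proved, stated in full; the proofs are below) =====
def Claim_equal_calc_section_data : Prop := ∀ (size : Int) (num_parts : Int), Dom_calc_section_data size num_parts → Spec_calc_section_data size num_parts (calc_section_data size num_parts)

-- ===== LEMMAS AND PROOFS =====

-- Closed form of one section, indexed by i, for a split of m into n parts.
def pvSec (s m : Int) (n : Int) (i : Int) : List (String × Int) :=
  let q := PySem.Int.floordiv m n
  let r := PySem.Int.mod m n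
  [("start", s + i * q + min i r),
   ("end", s + i * q + min i r + (q + if i < r then 1 else 0) - 1),
   ("size", q + if i < r then 1 else 0)]

-- A's loop invariant: after m iterations the threaded state is determined by m.
theorem pv_loop_inv (q r : Int) (hr : 0 ≤ r) (m : Nat) :
    (PySem.List.pyRange 0 (m : Int) 1).foldl
      (fun (s : Int × Int × List (List (String × Int))) (_ : Int) =>
        (if (s.2.1 != 0) = true then s.1 + q + 1 else s.1 + q,
         if (s.2.1 != 0) = true then s.2.1 - 1 else s.2.1,
         s.2.2 ++ [[("start", s.1),
                    ("end", (if (s.2.1 != 0) = true then s.1 + q + 1 else s.1 + q) - 1),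
                    ("size", (if (s.2.1 != 0) = true then s.1 + q + 1 else s.1 + q) - s.1)]]))
      (0, r, [])
    = ((m : Int) * q + min (m : Int) r, r - min (m : Int) r,
       (PySem.List.pyRange 0 (m : Int) 1).map (fun i =>
         [("start", i * q + min i r),
          ("end", i * q + min i r + (q + if i < r then 1 else 0) - 1),
          ("size", q + if i < r then 1 else 0)])) := by
  induction m with
  | zero => simp [PySem.List.pyRange_one_eq_nil]; omega
  | succ n ih =>
    have h0 : (0 : Int) ≤ (n : Int) := by positivity
    have hcast : ((n + 1 : Nat) : Int) = (n : Int) + 1 := by push_cast; ring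
    rw [hcast, PySem.List.pyRange_one_succ_right h0, List.foldl_append, List.map_append, ih]
    simp only [List.foldl_cons, List.foldl_nil, List.map_cons, List.map_nil]
    by_cases hlt : (n : Int) < r
    · have hm : min (n : Int) r = (n : Int) := by omega
      have hm' : min ((n : Int) + 1) r = (n : Int) + 1 := by omega
      have hne : (r - min (n : Int) r != 0) = true := by
        simp only [hm, bne_iff_ne, ne_eq]; omega
      simp only [hne, if_pos hlt, hm, hm']
      refine Prod.ext ?_ (Prod.ext ?_ ?_) <;> simp <;> ring_nf <;> omega
    · have hm : min (n : Int) r = r := by omega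
      have hm' : min ((n : Int) + 1) r = r := by omega
      have hne : (r - min (n : Int) r != 0) = false := by simp [hm]
      simp only [hne, if_neg hlt, hm, hm']
      refine Prod.ext ?_ (Prod.ext ?_ ?_) <;> simp <;> ring_nf <;> omega

-- B's greedy peel computes the same closed form.
theorem pvPeel_eq (n : Nat) : ∀ (s m : Int),
    pvPeel s m n = (PySem.List.pyRange 0 (n : Int) 1).map (pvSec s m (n : Int)) := by
  induction n with
  | zero => intro s m; simp [pvPeel, PySem.List.pyRange_one_eq_nil]
  | succ n ih =>
    intro s m
    have hnp : (0 : Int) < (n : Int) + 1 := by positivity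
    set q := PySem.Int.floordiv m ((n : Int) + 1) with hq
    set r := PySem.Int.mod m ((n : Int) + 1) with hrdef
    have hid : q * ((n : Int) + 1) + r = m := PySem.Int.floordiv_mul_add_mod m _
    have hr0 : 0 ≤ r := PySem.Int.mod_nonneg m hnp
    have hrlt : r < (n : Int) + 1 := PySem.Int.mod_lt m hnp
    clear_value q r
    have hb : q * ((n : Int) + 1) = q * (n : Int) + q := by ring
    have hL : -(PySem.Int.floordiv (-m) ((n : Int) + 1)) = q + (if 0 < r then 1 else 0) := by
      rw [PySem.Int.neg_floordiv_neg_eq_iff_of_pos hnp]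
      by_cases hp : 0 < r
      · rw [if_pos hp]
        constructor
        · have e : (q + 1 - 1) * ((n : Int) + 1) = q * ((n : Int) + 1) := by ring
          rw [e]; linarith
        · have e : (q + 1) * ((n : Int) + 1) = q * ((n : Int) + 1) + ((n : Int) + 1) := by ring
          rw [e]; linarith
      · rw [if_neg hp]
        constructor
        · have e : (q + 0 - 1) * ((n : Int) + 1) = q * ((n : Int) + 1) - ((n : Int) + 1) := by ring
          rw [e]; linarith
        · have e2 : (q + 0) * ((n : Int) + 1) = q * ((n : Int) + 1) := by ring
          rw [e2]; linarith
    have hcast : ((n + 1 : Nat) : Int) = (n : Int) + 1 := by push_cast; ring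
    rw [hcast]
    show ([("start", s), _, _] :: pvPeel _ _ n) = _
    rw [PySem.List.pyRange_one_cons (by positivity : (0:Int) < (n:Int)+1)]
    rw [List.map_cons, ih]
    by_cases hn : n = 0
    · subst hn
      simp only [Nat.cast_zero, pvSec]
      have hrz : r = 0 := by omega
      have hqm : q = m := by push_cast at hid; linarith
      rw [PySem.List.pyRange_one_eq_nil (by norm_num : (0:Int)+1 ≤ 0+1)]
      simp
    · have hnpos : (0 : Int) < (n : Int) := by
        have := Nat.pos_of_ne_zero hn; exact_mod_cast this
      set L := q + (if 0 < r then 1 else 0) with hLdef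
      clear_value L
      have hq' : PySem.Int.floordiv (m - L) (n : Int) = q := by
        rw [PySem.Int.floordiv_eq_iff_of_pos hnpos]
        have hb2 : (q + 1) * (n : Int) = q * (n : Int) + (n : Int) := by ring
        rw [hb2]
        by_cases hp : 0 < r
        · have hLv : L = q + 1 := by rw [hLdef, if_pos hp]
          rw [hLv]; constructor <;> linarith
        · have hLv : L = q + 0 := by rw [hLdef, if_neg hp]
          rw [hLv]; constructor <;> linarith
      have hr' : PySem.Int.mod (m - L) (n : Int) = r - (if 0 < r then 1 else 0) := by
        have h2 := PySem.Int.floordiv_mul_add_mod (m - L) (n : Int)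
        rw [hq'] at h2
        by_cases hp : 0 < r
        · rw [if_pos hp]
          have hLv : L = q + 1 := by rw [hLdef, if_pos hp]
          rw [hLv] at h2 ⊢; linarith
        · rw [if_neg hp]
          have hLv : L = q + 0 := by rw [hLdef, if_neg hp]
          rw [hLv] at h2 ⊢; linarith
      simp only [hL]
      congr 1
      · -- head section
        simp only [pvSec, ← hq, ← hrdef]
        have hmin : min (0 : Int) r = 0 := by omega
        simp only [hmin, hLdef, zero_mul, add_zero]
      · -- tail: shift the index by one
        have e0 : ((n : Int) - 0).toNat = n := by simp
        have e1 : ((n : Int) + 1 - 1).toNat = n := by simp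
        rw [show (0:Int) + 1 = 1 from by norm_num, PySem.List.pyRange_one 1,
            PySem.List.pyRange_one 0, e1, e0, List.map_map, List.map_map]
        refine List.map_congr_left ?_
        intro k hk
        simp only [Function.comp_apply, pvSec, hq', hr', ← hq, ← hrdef, zero_add]
        by_cases hp : 0 < r
        · have h1 : (if 0 < r then (1:Int) else 0) = 1 := if_pos hp
          have hmm : min (1 + (k : Int)) r = min (k : Int) (r - 1) + 1 := by omega
          have hif : (if (1:Int) + (k : Int) < r then (1:Int) else 0)
              = (if (k : Int) < r - 1 then (1:Int) else 0) := by
            by_cases h : (1:Int) + (k : Int) < r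
            · rw [if_pos h, if_pos (by omega)]
            · rw [if_neg h, if_neg (by omega)]
          rw [h1, hLdef, h1, hif, hmm]
          ring_nf
        · have h0 : (if 0 < r then (1:Int) else 0) = 0 := if_neg hp
          have hm1 : min (1 + (k : Int)) r = 0 := by omega
          have hm0 : min ((k : Int)) (r - 0) = 0 := by omega
          have hi1 : (if (1:Int) + (k : Int) < r then (1:Int) else 0) = 0 := by
            rw [if_neg (by omega)]
          have hi0 : (if ((k : Int)) < r - 0 then (1:Int) else 0) = 0 := by
            rw [if_neg (by omega)]
          rw [h0, hLdef, h0, hm1, hm0, hi1, hi0]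
          ring_nf

-- ===== VERDICT (by name: the statement is the Claim_ definition above) =====
theorem calc_section_data_spec : Claim_equal_calc_section_data := by
  intro size num_parts _
  unfold Spec_calc_section_data calc_section_data calc_section_data_alt
  by_cases hz : size == 0
  · simp [hz]
  · simp only [hz, Bool.false_eq_true, if_false]
    set np := if num_parts == 0 then 1 else if num_parts > size then size else num_parts with hnp
    clear_value np
    by_cases hpos : 0 < np
    · obtain ⟨k, hk⟩ : ∃ k : Nat, np = (k : Int) := ⟨np.toNat, by omega⟩
      subst hk
      have hr : 0 ≤ PySem.Int.mod size (k : Int) := PySem.Int.mod_nonneg size hpos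
      have hA := pv_loop_inv (PySem.Int.floordiv size (k : Int)) (PySem.Int.mod size (k : Int)) hr k
      rw [hA]
      have hB := pvPeel_eq k 0 size
      rw [Int.toNat_natCast, hB]
      refine List.map_congr_left ?_
      intro i _
      simp [pvSec]
    · have hnil : PySem.List.pyRange 0 np 1 = [] := PySem.List.pyRange_one_eq_nil (by omega)
      have : np.toNat = 0 := by omega
      simp [hnil, this, pvPeel]
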